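-- pv_equiv track=rewrite | github.com/jacob-mannhardt/ZEN-garden-fork | plotting/plotting_for_pub.py | threshold_matrix_diagonal_bl_tr
-- ===== SOURCE A (Python) =====
-- def threshold_matrix_diagonal_bl_tr(matrix, threshold):
--     """
--     Returns a new matrix (list of lists) where values on and below the diagonal from bottom left to top right
--     and above the threshold are set to 1, and all other values are set to 0.
--
--     :param matrix: A list of lists representing the matrix.
--     :param threshold: The threshold value to compare against.
--     :return: A new list of lists with values set based on the condition.
--     """
--     n = len(matrix)  # Assuming the matrix is square
--     new_matrix = [[0 for _ in range(n)] for _ in range(n)]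
--
--     for i in range(n):
--         for j in range(n):
--             # Including values on and below the diagonal from bottom left to top right (j >= n - i - 1)
--             if j >= n - i - 1 and matrix[i][j] > threshold:
--                 new_matrix[i][j] = 1
--
--     return new_matrix
-- ===== SOURCE B (Python) =====
-- def threshold_matrix_diagonal_bl_tr(matrix, threshold):
--     # Recursive, mirrored formulation: reflecting each row left-right turns the
--     # bottom-left/top-right anti-diagonal region into an ordinary lower triangle,
--     # whose active prefix simply grows by one per row (no n-i-1 index arithmetic).
--     n = len(matrix)
--
--     def go(rows, width):
--         if not rows:
--             return []
--         mirrored = rows[0][:n][::-1]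
--         row = ([1 if v > threshold else 0 for v in mirrored[:width]]
--                + [0] * (n - width))[::-1]
--         return [row] + go(rows[1:], width + 1)
--
--     return go(matrix, 1)
-- ===== Notes on version B (the rewrite author's own statement) =====
-- stated objective: alternative
-- what changed: B reflects each row left-right so the anti-diagonal region becomes a lower triangle whose active prefix grows by one per row, thresholds that growing prefix recursively with a width counter, pads with zeros and reflects the row back, instead of A's full n x n zero allocation and per-cell 'j >= n-i-1' guarded double scan.
-- outside the precondition, e.g. on threshold_matrix_diagonal_bl_tr([[1], [2, 3]], 0): A raises IndexError, B returns [[0, 1], [1, 1]]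
import Mathlib
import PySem

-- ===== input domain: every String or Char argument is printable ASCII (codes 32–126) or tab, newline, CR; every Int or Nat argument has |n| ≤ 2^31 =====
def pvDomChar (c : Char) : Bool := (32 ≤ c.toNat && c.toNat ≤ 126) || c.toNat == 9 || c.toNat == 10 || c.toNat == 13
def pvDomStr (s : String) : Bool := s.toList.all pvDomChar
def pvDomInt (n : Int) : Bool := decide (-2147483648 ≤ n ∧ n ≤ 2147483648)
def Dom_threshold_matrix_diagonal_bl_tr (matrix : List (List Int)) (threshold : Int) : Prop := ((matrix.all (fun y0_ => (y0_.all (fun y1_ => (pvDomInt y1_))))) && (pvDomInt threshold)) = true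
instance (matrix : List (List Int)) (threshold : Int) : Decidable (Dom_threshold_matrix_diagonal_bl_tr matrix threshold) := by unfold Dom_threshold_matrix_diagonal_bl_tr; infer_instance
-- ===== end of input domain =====

-- B mirrors each row left-right so the anti-diagonal region becomes a lower triangle whose
-- active prefix grows by one per recursive row step, instead of A's full zero-matrix
-- allocation and per-cell guarded double scan (objective: alternative decomposition).

-- ===== PORT A =====
def threshold_matrix_diagonal_bl_tr (matrix : List (List Int)) (threshold : Int) : List (List Int) :=
  let n : Int := PySem.List.len matrix
  let new_matrix : List (List Int) :=
    (PySem.List.pyRange 0 n).map (fun _ => (PySem.List.pyRange 0 n).map (fun _ => (0 : Int)))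
  (PySem.List.pyRange 0 n).foldl (fun nm i =>
    (PySem.List.pyRange 0 n).foldl (fun nm j =>
      if n - i - 1 ≤ j ∧ threshold < PySem.List.pyGetD (PySem.List.pyGetD matrix i []) j 0 then
        PySem.List.pySetD nm i (PySem.List.pySetD (PySem.List.pyGetD nm i []) j 1)
      else nm) nm) new_matrix

-- ===== PORT B =====
-- go(rows, width) of Source B; '[::-1]' is List.reverse (PySem.List.slice?_none_none_neg_one)
def pvGoB (threshold n : Int) (rows : List (List Int)) (width : Int) : List (List Int) :=
  match rows with
  | [] => []
  | head :: tl =>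
    let mirrored := (PySem.List.slice head none (some n)).reverse
    let row := ((PySem.List.slice mirrored none (some width)).map
                  (fun v => if threshold < v then (1 : Int) else 0)
                ++ PySem.List.pyRepeat [(0 : Int)] (n - width)).reverse
    row :: pvGoB threshold n tl (width + 1)

def threshold_matrix_diagonal_bl_tr_alt (matrix : List (List Int)) (threshold : Int) : List (List Int) :=
  pvGoB threshold (PySem.List.len matrix) matrix 1

-- ===== PRECONDITION & SPEC =====
-- Pre_ excludes matrices with a row shorter than len(matrix): there A's cell access matrix[i][j] raises IndexError.
def Pre_threshold_matrix_diagonal_bl_tr (matrix : List (List Int)) (threshold : Int) : Prop :=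
  ∀ row ∈ matrix, matrix.length ≤ row.length
instance (matrix : List (List Int)) (threshold : Int) : Decidable (Pre_threshold_matrix_diagonal_bl_tr matrix threshold) := by unfold Pre_threshold_matrix_diagonal_bl_tr; infer_instance

def pvWitness_threshold_matrix_diagonal_bl_tr : List (List Int) × Int := ([[1, 0], [0, 1]], 0)

def Spec_threshold_matrix_diagonal_bl_tr (matrix : List (List Int)) (threshold : Int) (out : List (List Int)) : Prop := out = threshold_matrix_diagonal_bl_tr_alt matrix threshold
instance (matrix : List (List Int)) (threshold : Int) (out : List (List Int)) : Decidable (Spec_threshold_matrix_diagonal_bl_tr matrix threshold out) := by unfold Spec_threshold_matrix_diagonal_bl_tr; infer_instance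

-- ===== CLAIM (what is proved, stated in full; the proofs are below) =====
def Claim_equal_threshold_matrix_diagonal_bl_tr : Prop := ∀ (matrix : List (List Int)) (threshold : Int), Dom_threshold_matrix_diagonal_bl_tr matrix threshold → Pre_threshold_matrix_diagonal_bl_tr matrix threshold → Spec_threshold_matrix_diagonal_bl_tr matrix threshold (threshold_matrix_diagonal_bl_tr matrix threshold)

-- ===== LEMMAS AND PROOFS =====

-- the value both programs compute for row i (over the full index range 0..n-1)
def pvRow (matrix : List (List Int)) (threshold : Int) (n i : Nat) : List Int :=
  (List.range n).map (fun (j : Nat) =>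
    if (n : Int) - i - 1 ≤ (j : Int) ∧ threshold < (matrix.getD i []).getD j 0 then (1 : Int) else 0)

theorem pv_set_map_range {α : Type} (f : Nat → α) (n m : Nat) (v : α) (hm : m < n) :
    ((List.range n).map f).set m v = (List.range n).map (fun j => if j = m then v else f j) := by
  apply List.ext_getElem
  · simp
  · intro k hk1 hk2
    simp only [List.getElem_set, List.getElem_map, List.getElem_range]
    split_ifs <;> first | rfl | omega

theorem pv_rowfold (C : Nat → Prop) [DecidablePred C] (n : Nat) (L : List Nat)
    (hL : ∀ j ∈ L, j < n) (f : Nat → Int) :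
    L.foldl (fun r j => if C j then r.set j 1 else r) ((List.range n).map f)
      = (List.range n).map (fun j => if j ∈ L ∧ C j then 1 else f j) := by
  induction L generalizing f with
  | nil => simp
  | cons a tl ih =>
    simp only [List.foldl_cons]
    by_cases hCa : C a
    · rw [if_pos hCa, pv_set_map_range _ _ _ _ (hL a (by simp)),
        ih (fun j hj => hL j (by simp [hj]))]
      apply List.map_congr_left
      intro j hj
      by_cases hja : j = a
      · subst hja; simp [hCa]
      · simp only [List.mem_cons]
        split_ifs <;> tauto
    · rw [if_neg hCa, ih (fun j hj => hL j (by simp [hj]))]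
      apply List.map_congr_left
      intro j hj
      by_cases hja : j = a
      · subst hja; simp [hCa]
      · simp only [List.mem_cons]
        split_ifs <;> tauto

theorem pv_getD_set_self (l : List (List Int)) (i : Nat) (x : List Int) (h : i < l.length) :
    (l.set i x).getD i [] = x := by
  simp [List.getD_eq_getElem?_getD, List.getElem?_set_self h]

theorem pv_inner (C : Nat → Prop) [DecidablePred C] (i : Nat) (L : List Nat) :
    ∀ nm : List (List Int), i < nm.length →
    L.foldl (fun nm j => if C j then nm.set i ((nm.getD i []).set j 1) else nm) nm
      = nm.set i (L.foldl (fun r j => if C j then r.set j 1 else r) (nm.getD i [])) := by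
  induction L with
  | nil =>
    intro nm h
    simp [List.getD_eq_getElem?_getD, List.getElem?_eq_getElem h, List.set_getElem_self h]
  | cons a tl ih =>
    intro nm h
    simp only [List.foldl_cons]
    by_cases hCa : C a
    · rw [if_pos hCa, if_pos hCa, ih _ (by simpa using h),
        pv_getD_set_self nm i _ h, List.set_set]
    · rw [if_neg hCa, if_neg hCa, ih _ h]

theorem pv_outer (matrix : List (List Int)) (threshold : Int) :
    ∀ m, m ≤ matrix.length →
    (List.range m).foldl
      (fun nm (i : Nat) => (List.range matrix.length).foldl
        (fun nm (j : Nat) => if (matrix.length : Int) - i - 1 ≤ (j : Int) ∧ threshold < (matrix.getD i []).getD j 0 then nm.set i ((nm.getD i []).set j 1) else nm) nm)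
      ((List.range matrix.length).map (fun _ => (List.range matrix.length).map (fun _ => (0 : Int))))
    = (List.range matrix.length).map
        (fun i => if i < m then pvRow matrix threshold matrix.length i
                  else (List.range matrix.length).map (fun _ => (0 : Int))) := by
  intro m
  induction m with
  | zero => intro _; simp
  | succ m ih =>
    intro hm
    rw [List.range_succ, List.foldl_append, ih (by omega), List.foldl_cons, List.foldl_nil,
      pv_inner (fun j => (matrix.length : Int) - m - 1 ≤ (j : Int) ∧ threshold < (matrix.getD m []).getD j 0) m _ _ (by simp; omega)]
    have hget : (((List.range matrix.length).map
        (fun i => if i < m then pvRow matrix threshold matrix.length i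
                  else (List.range matrix.length).map (fun _ => (0 : Int)))).getD m [])
        = (List.range matrix.length).map (fun _ => (0 : Int)) := by
      rw [List.getD_eq_getElem?_getD]
      simp [List.getElem?_map, List.getElem?_range (by omega : m < matrix.length)]
    rw [hget, pv_rowfold (fun j => (matrix.length : Int) - m - 1 ≤ (j : Int) ∧ threshold < (matrix.getD m []).getD j 0) matrix.length (List.range matrix.length)
        (fun j hj => List.mem_range.mp hj) (fun _ => 0),
      pv_set_map_range _ _ _ _ (by omega)]
    apply List.map_congr_left
    intro i hi
    by_cases him : i = m
    · rw [if_pos him, if_pos (by omega : i < m + 1), him]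
      unfold pvRow
      apply List.map_congr_left
      intro j hj
      simp [List.mem_range.mp hj]
    · rw [if_neg him]
      by_cases hlt : i < m
      · rw [if_pos hlt, if_pos (by omega)]
      · rw [if_neg hlt, if_neg (by omega)]

theorem pv_A_eq (matrix : List (List Int)) (threshold : Int) :
    threshold_matrix_diagonal_bl_tr matrix threshold
      = (List.range matrix.length).map (pvRow matrix threshold matrix.length) := by
  unfold threshold_matrix_diagonal_bl_tr
  simp only [PySem.List.len_eq, PySem.List.pyRange_zero_nat, List.foldl_map, List.map_map,
    PySem.List.pyGetD_natCast, PySem.List.pySetD_natCast]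
  have := pv_outer matrix threshold matrix.length le_rfl
  simp only [Function.comp_def] at this ⊢
  rw [this]
  apply List.map_congr_left
  intro i hi
  rw [if_pos (List.mem_range.mp hi)]

-- B's recursion unrolled: pvGoB is an indexed map over the rows
theorem pv_goB_eq (threshold n : Int) :
    ∀ (rows : List (List Int)) (w : Int),
    pvGoB threshold n rows w
      = (List.range rows.length).map (fun i =>
          ((PySem.List.slice ((PySem.List.slice (rows.getD i []) none (some n)).reverse)
              none (some (w + i))).map (fun v => if threshold < v then (1 : Int) else 0)
            ++ PySem.List.pyRepeat [(0 : Int)] (n - (w + i))).reverse) := by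
  intro rows
  induction rows with
  | nil => intro w; simp [pvGoB]
  | cons head tl ih =>
    intro w
    simp only [pvGoB, List.length_cons, List.range_succ_eq_map, List.map_cons, List.map_map]
    congr 1
    · simp
    · rw [ih (w + 1)]
      apply List.map_congr_left
      intro i _
      simp only [Function.comp_def, List.getD_cons_succ]
      have : w + ((i : Int) + 1) = w + 1 + (i : Int) := by ring
      push_cast
      rw [this]

-- per-row: the mirrored growing-prefix row equals pvRow
theorem pv_rowB_eq (matrix : List (List Int)) (threshold : Int) (i : Nat)
    (hi : i < matrix.length) (hrow : matrix.length ≤ (matrix.getD i []).length) :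
    ((PySem.List.slice ((PySem.List.slice (matrix.getD i []) none (some (matrix.length : Int))).reverse)
        none (some (1 + (i : Int)))).map (fun v => if threshold < v then (1 : Int) else 0)
      ++ PySem.List.pyRepeat [(0 : Int)] ((matrix.length : Int) - (1 + (i : Int)))).reverse
    = pvRow matrix threshold matrix.length i := by
  set row := matrix.getD i [] with hrowdef
  set n := matrix.length with hndef
  have h1 : (1 : Int) + (i : Int) = ((i + 1 : Nat) : Int) := by push_cast; ring
  have h2 : (n : Int) - ((i + 1 : Nat) : Int) = ((n - 1 - i : Nat) : Int) := by omega
  rw [h1, h2, PySem.List.slice_to_natCast, PySem.List.slice_to_natCast,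
    PySem.List.pyRepeat_singleton]
  simp only [Int.toNat_natCast]
  have hmlen : (row.take n).reverse.length = n := by simp; omega
  apply List.ext_getElem
  · simp [pvRow]; omega
  · intro k hk1 hk2
    simp only [pvRow, List.length_map, List.length_range] at hk2 ⊢
    have hlenA : (((row.take n).reverse.take (i + 1)).map
        (fun v => if threshold < v then (1 : Int) else 0)).length = i + 1 := by
      simp; omega
    have hlentot : ((((row.take n).reverse.take (i + 1)).map
        (fun v => if threshold < v then (1 : Int) else 0))
        ++ List.replicate (n - 1 - i) (0 : Int)).length = n := by
      simp [hlenA]; omega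
    rw [List.getElem_reverse]
    simp only [List.getElem_map, List.getElem_range]
    simp only [hlentot]
    by_cases hks : k < n - 1 - i
    · rw [List.getElem_append_right (by rw [hlenA]; omega)]
      simp only [List.getElem_replicate]
      have : ¬ ((n : Int) - (i : Int) - 1 ≤ (k : Int)) := by omega
      rw [if_neg (fun h => this h.1)]
    · rw [List.getElem_append_left (by rw [hlenA]; omega)]
      simp only [List.getElem_map, List.getElem_take, List.getElem_reverse]
      have hk3 : k < row.length := by omega
      have hidx : (row.take n).length - 1 - (n - 1 - k) = k := by simp; omega
      rw [List.getD_eq_getElem _ _ hk3]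
      simp only [hidx]
      have hA : (n : Int) - (i : Int) - 1 ≤ (k : Int) := by omega
      by_cases hB : threshold < row[k]
      · rw [if_pos hB, if_pos ⟨hA, hB⟩]
      · rw [if_neg hB, if_neg (fun h => hB h.2)]

theorem pv_B_eq (matrix : List (List Int)) (threshold : Int)
    (hpre : Pre_threshold_matrix_diagonal_bl_tr matrix threshold) :
    threshold_matrix_diagonal_bl_tr_alt matrix threshold
      = (List.range matrix.length).map (pvRow matrix threshold matrix.length) := by
  unfold threshold_matrix_diagonal_bl_tr_alt
  rw [PySem.List.len_eq, pv_goB_eq]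
  apply List.map_congr_left
  intro i hi
  have hin : i < matrix.length := List.mem_range.mp hi
  have hrow : matrix.length ≤ (matrix.getD i []).length := by
    apply hpre
    rw [List.getD_eq_getElem _ _ hin]
    exact List.getElem_mem hin
  exact pv_rowB_eq matrix threshold i hin hrow

-- ===== VERDICT (by name: the statement is the Claim_ definition above) =====
theorem threshold_matrix_diagonal_bl_tr_spec : Claim_equal_threshold_matrix_diagonal_bl_tr := by
  intro matrix threshold _ hpre
  unfold Spec_threshold_matrix_diagonal_bl_tr
  rw [pv_A_eq, pv_B_eq matrix threshold hpre]
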